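-- pv_equiv track=rewrite | github.com/darshanrao/hack-tx-manga-narration | data_processing/scene_character_analyzer.py | _generate_voice_recommendations
-- ===== SOURCE A (Python) =====
-- from typing import Dict, List, Any, Set, Optional
--
-- def _generate_voice_recommendations(character_consistency: Dict[str, Any]) -> Dict[str, str]:
--     """
--     Generate voice assignment recommendations based on character analysis
--
--     Args:
--         character_consistency: Character consistency data
--
--     Returns:
--         Voice assignment recommendations
--     """
--     recommendations = {}
--
--     # Male voices
--     male_voices = [
--         "5kMbtRSEKIkRZSdXxrZg",
--         "wI49R6YUU5NNP1h0CECc",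
--         "vBKc2FfBKJfcZNyEt1n6",
--         "FIsP50cHv9JY47BkNVR7",
--         "s0XGIcqmceN2l7kjsqoZ"
--     ]
--
--     # Female voices
--     female_voices = [
--         "CaT0A6YBELRBgT6Qa2lH",
--         "bMxLr8fP6hzNRRi9nJxU",
--         "Bn9xWp6PwkrqKRbq8cX2",
--         "iNwc1Lv2YQLywnCvjfn1",
--         "uYXf8XasLslADfZ2MB4u"
--     ]
--
--     male_voice_index = 0
--     female_voice_index = 0
--
--     # Assign voices based on gender detection
--     for char_name, char_data in character_consistency.items():
--         # Simple gender detection based on name patterns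
--         name_lower = char_name.lower()
--
--         # Female name patterns
--         if any(keyword in name_lower for keyword in ["mikasa", "mrs", "miss", "lady", "woman", "girl", "female", "mother", "sister", "daughter"]):
--             voice_id = female_voices[female_voice_index % len(female_voices)]
--             female_voice_index += 1
--         else:
--             # Default to male for unknown
--             voice_id = male_voices[male_voice_index % len(male_voices)]
--             male_voice_index += 1
--
--         recommendations[char_name] = voice_id
--
--     return recommendations
-- ===== SOURCE B (Python) =====
-- def _generate_voice_recommendations(character_consistency):
--     male_voices = [
--         "5kMbtRSEKIkRZSdXxrZg",
--         "wI49R6YUU5NNP1h0CECc",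
--         "vBKc2FfBKJfcZNyEt1n6",
--         "FIsP50cHv9JY47BkNVR7",
--         "s0XGIcqmceN2l7kjsqoZ",
--     ]
--     female_voices = [
--         "CaT0A6YBELRBgT6Qa2lH",
--         "bMxLr8fP6hzNRRi9nJxU",
--         "Bn9xWp6PwkrqKRbq8cX2",
--         "iNwc1Lv2YQLywnCvjfn1",
--         "uYXf8XasLslADfZ2MB4u",
--     ]
--     female_keywords = ["mikasa", "mrs", "miss", "lady", "woman", "girl", "female", "mother", "sister", "daughter"]
--     names = list(character_consistency)
--     genders = [any(keyword in name.lower() for keyword in female_keywords) for name in names]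
--     # females_so_far[i] = number of female names among the first i names (prefix sums)
--     females_so_far = [0]
--     for g in genders:
--         females_so_far.append(females_so_far[-1] + g)
--     # the voice of a name is fixed by its gender and how many same-gender names precede it
--     return {
--         name: (female_voices[females_so_far[i] % 5] if g else male_voices[(i - females_so_far[i]) % 5])
--         for i, (name, g) in enumerate(zip(names, genders))
--     }
-- ===== Notes on version B (the rewrite author's own statement) =====
-- stated objective: alternative
-- what changed: Replaces A's single imperative loop with two interleaved mutable voice counters by a staged pipeline: precompute the gender list, build a prefix-sum list of female counts, then emit the dict in one comprehension indexing voices by prefix counts.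
import Mathlib
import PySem

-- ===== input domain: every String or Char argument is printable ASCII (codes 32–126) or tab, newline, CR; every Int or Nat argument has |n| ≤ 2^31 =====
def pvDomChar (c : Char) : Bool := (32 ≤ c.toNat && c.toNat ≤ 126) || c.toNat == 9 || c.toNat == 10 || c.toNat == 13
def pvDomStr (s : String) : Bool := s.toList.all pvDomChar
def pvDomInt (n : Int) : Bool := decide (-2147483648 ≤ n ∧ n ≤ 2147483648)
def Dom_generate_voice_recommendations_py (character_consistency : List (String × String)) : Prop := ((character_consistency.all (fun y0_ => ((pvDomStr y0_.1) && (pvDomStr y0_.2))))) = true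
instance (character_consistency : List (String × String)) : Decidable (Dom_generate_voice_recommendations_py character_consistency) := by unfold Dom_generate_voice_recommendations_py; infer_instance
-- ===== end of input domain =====

-- B replaces A's running male/female voice counters by a staged pipeline: gender list,
-- prefix sums of female counts, then one dict comprehension (objective: alternative).

-- shared constants / the shared gender test (the same Python expression appears in both programs)
def pvMaleVoices : List String :=
  ["5kMbtRSEKIkRZSdXxrZg", "wI49R6YUU5NNP1h0CECc", "vBKc2FfBKJfcZNyEt1n6",
   "FIsP50cHv9JY47BkNVR7", "s0XGIcqmceN2l7kjsqoZ"]

def pvFemaleVoices : List String :=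
  ["CaT0A6YBELRBgT6Qa2lH", "bMxLr8fP6hzNRRi9nJxU", "Bn9xWp6PwkrqKRbq8cX2",
   "iNwc1Lv2YQLywnCvjfn1", "uYXf8XasLslADfZ2MB4u"]

def pvFemaleKeywords : List String :=
  ["mikasa", "mrs", "miss", "lady", "woman", "girl", "female", "mother", "sister", "daughter"]

-- any(keyword in char_name.lower() for keyword in [...])
def pvIsFemale (name : String) : Bool :=
  pvFemaleKeywords.any (fun kw => PySem.Str.isIn kw (PySem.Str.lower name))

-- ===== PORT A =====
-- loop over items with two counters; fv[i % 5] is always in range (i ≥ 0), so the .getD "" default is unreachable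
def generate_voice_recommendations_py (character_consistency : List (String × String)) : List (String × String) :=
  (character_consistency.foldl
    (fun (st : PySem.Dict String String × Int × Int) p =>
      if pvIsFemale p.1 then
        (st.1.insert p.1 ((PySem.List.pyGet? pvFemaleVoices (PySem.Int.mod st.2.2 5)).getD ""),
         st.2.1, st.2.2 + 1)
      else
        (st.1.insert p.1 ((PySem.List.pyGet? pvMaleVoices (PySem.Int.mod st.2.1 5)).getD ""),
         st.2.1 + 1, st.2.2))
    (PySem.Dict.empty, 0, 0)).1.items

-- ===== PORT B =====
-- precomputed gender list, prefix sums females_so_far, then one dict comprehension;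
-- fsf[-1] and fsf[i] / the voice index are always in range, so each .getD default is unreachable
def generate_voice_recommendations_py_alt (character_consistency : List (String × String)) : List (String × String) :=
  let names := character_consistency.map Prod.fst
  let genders := names.map pvIsFemale
  let fsf := genders.foldl
    (fun (acc : List Int) g => acc ++ [(PySem.List.pyGet? acc (-1)).getD 0 + (if g then 1 else 0)])
    [(0 : Int)]
  ((PySem.List.enumerate (names.zip genders)).foldl
    (fun (d : PySem.Dict String String) ig =>
      d.insert ig.2.1
        (if ig.2.2 then
          (PySem.List.pyGet? pvFemaleVoices (PySem.Int.mod ((PySem.List.pyGet? fsf ig.1).getD 0) 5)).getD ""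
        else
          (PySem.List.pyGet? pvMaleVoices (PySem.Int.mod (ig.1 - (PySem.List.pyGet? fsf ig.1).getD 0) 5)).getD ""))
    PySem.Dict.empty).items

-- ===== PRECONDITION & SPEC =====
def Spec_generate_voice_recommendations_py (character_consistency : List (String × String)) (out : List (String × String)) : Prop := out = generate_voice_recommendations_py_alt character_consistency
instance (character_consistency : List (String × String)) (out : List (String × String)) : Decidable (Spec_generate_voice_recommendations_py character_consistency out) := by unfold Spec_generate_voice_recommendations_py; infer_instance

-- ===== CLAIM (what is proved, stated in full; the proofs are below) =====
def Claim_equal_generate_voice_recommendations_py : Prop := ∀ (character_consistency : List (String × String)), Dom_generate_voice_recommendations_py character_consistency → Spec_generate_voice_recommendations_py character_consistency (generate_voice_recommendations_py character_consistency)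

-- ===== LEMMAS AND PROOFS =====

-- reference recursion both ports are reduced to: process the remaining items with the
-- current male/female counters, inserting each voice as A does
def pvGold : List (String × String) → Int → Int → PySem.Dict String String → PySem.Dict String String
  | [], _, _, d => d
  | p :: t, mi, fi, d =>
      if pvIsFemale p.1 then
        pvGold t mi (fi + 1)
          (d.insert p.1 ((PySem.List.pyGet? pvFemaleVoices (PySem.Int.mod fi 5)).getD ""))
      else
        pvGold t (mi + 1) fi
          (d.insert p.1 ((PySem.List.pyGet? pvMaleVoices (PySem.Int.mod mi 5)).getD ""))

theorem pvA_eq_gold (t : List (String × String)) :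
    ∀ (mi fi : Int) (d : PySem.Dict String String),
      (t.foldl
        (fun (st : PySem.Dict String String × Int × Int) p =>
          if pvIsFemale p.1 then
            (st.1.insert p.1 ((PySem.List.pyGet? pvFemaleVoices (PySem.Int.mod st.2.2 5)).getD ""),
             st.2.1, st.2.2 + 1)
          else
            (st.1.insert p.1 ((PySem.List.pyGet? pvMaleVoices (PySem.Int.mod st.2.1 5)).getD ""),
             st.2.1 + 1, st.2.2))
        (d, mi, fi)).1 = pvGold t mi fi d := by
  induction t with
  | nil => intro mi fi d; rfl
  | cons p t ih =>
      intro mi fi d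
      simp only [List.foldl_cons, pvGold]
      by_cases h : pvIsFemale p.1 = true
      · rw [if_pos h, if_pos h]; exact ih _ _ _
      · rw [if_neg h, if_neg h]; exact ih _ _ _

-- females_so_far equals the list of prefix counts of female names
def pvPrefix (G : List Bool) : List Int :=
  (List.range (G.length + 1)).map (fun k => ((G.take k).count true : Int))

theorem pvFsf_eq_prefix (gs : List Bool) :
    ∀ (pre : List Bool),
      gs.foldl
        (fun (acc : List Int) g => acc ++ [(PySem.List.pyGet? acc (-1)).getD 0 + (if g then 1 else 0)])
        (pvPrefix pre) = pvPrefix (pre ++ gs) := by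
  induction gs with
  | nil => intro pre; simp
  | cons g gs ih =>
      intro pre
      rw [List.foldl_cons]
      have hlast : (PySem.List.pyGet? (pvPrefix pre) (-1)).getD 0 = ((pre.count true : Nat) : Int) := by
        rw [PySem.List.pyGet?_neg_one]
        unfold pvPrefix
        rw [List.range_succ, List.map_append]
        simp
      have hstep : pvPrefix pre ++ [(PySem.List.pyGet? (pvPrefix pre) (-1)).getD 0 + (if g then 1 else 0)]
          = pvPrefix (pre ++ [g]) := by
        rw [hlast]
        unfold pvPrefix
        have hlen : (pre ++ [g]).length + 1 = (pre.length + 1) + 1 := by simp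
        rw [hlen, List.range_succ (n := pre.length + 1), List.map_append]
        congr 1
        · apply List.map_congr_left
          intro k hk
          have hkle : k ≤ pre.length := by
            have := List.mem_range.mp hk; omega
          rw [List.take_append_of_le_length hkle]
        · have hfull : (pre ++ [g]).take (pre.length + 1) = pre ++ [g] := by
            apply List.take_of_length_le; simp
          simp only [List.map_cons, List.map_nil, hfull, List.count_append]
          by_cases h : g = true <;> simp [h]
      rw [hstep, ih (pre ++ [g]), List.append_assoc]
      rfl

theorem pvB_eq_gold (t : List (String × String)) :
    ∀ (G : List Bool) (n : Nat) (d : PySem.Dict String String),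
      G.drop n = t.map (fun p => pvIsFemale p.1) →
      ((PySem.List.enumerate (t.map (fun p => (p.1, pvIsFemale p.1))) (n : Int)).foldl
        (fun (d : PySem.Dict String String) ig =>
          d.insert ig.2.1
            (if ig.2.2 then
              (PySem.List.pyGet? pvFemaleVoices (PySem.Int.mod ((PySem.List.pyGet? (pvPrefix G) ig.1).getD 0) 5)).getD ""
            else
              (PySem.List.pyGet? pvMaleVoices (PySem.Int.mod (ig.1 - (PySem.List.pyGet? (pvPrefix G) ig.1).getD 0) 5)).getD ""))
        d)
      = pvGold t (((G.take n).count false : Int)) (((G.take n).count true : Int)) d := by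
  induction t with
  | nil => intro G n d _; rfl
  | cons p t ih =>
      intro G n d hdrop
      have hn : n < G.length := by
        by_contra hle
        have : G.drop n = [] := List.drop_eq_nil_of_le (by omega)
        rw [this] at hdrop; simp at hdrop
      have hGn : G[n]? = some (pvIsFemale p.1) := by
        have h1 : (G.drop n).head? = G[n]? := List.head?_drop
        rw [hdrop] at h1; simpa using h1.symm
      have htake : G.take (n + 1) = G.take n ++ [pvIsFemale p.1] := by
        rw [List.take_add_one, hGn]; rfl
      have hdrop' : G.drop (n + 1) = t.map (fun p => pvIsFemale p.1) := by
        rw [← List.tail_drop, hdrop]; rfl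
      have hlookup : PySem.List.pyGet? (pvPrefix G) ((n : Nat) : Int)
          = some (((G.take n).count true : Nat) : Int) := by
        rw [PySem.List.pyGet?_natCast]
        unfold pvPrefix
        rw [List.getElem?_map, List.getElem?_range (by omega)]
        rfl
      have hcast : ((n : Int) + 1) = ((n + 1 : Nat) : Int) := by push_cast; ring
      have hmale : ((n : Int) - (((G.take n).count true : Nat) : Int))
          = (((G.take n).count false : Nat) : Int) := by
        have h1 := List.count_true_add_count_false (G.take n)
        have h2 : (G.take n).length = n := by
          rw [List.length_take]; omega
        rw [h2] at h1
        omega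
      simp only [List.map_cons, PySem.List.enumerate_cons, List.foldl_cons]
      rw [hlookup]
      simp only [Option.getD_some]
      rw [hmale, hcast, ih G (n + 1) _ hdrop']
      simp only [pvGold]
      by_cases h : pvIsFemale p.1 = true
      · rw [h]
        simp [htake, List.count_append, h]
      · have h' : pvIsFemale p.1 = false := by simpa using h
        rw [h']
        simp [htake, List.count_append, h']

-- ===== VERDICT (by name: the statement is the Claim_ definition above) =====
theorem generate_voice_recommendations_py_spec : Claim_equal_generate_voice_recommendations_py := by
  intro cc _
  unfold Spec_generate_voice_recommendations_py generate_voice_recommendations_py generate_voice_recommendations_py_alt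
  rw [pvA_eq_gold]
  show (pvGold cc 0 0 PySem.Dict.empty).items =
    (let fsf := ((cc.map Prod.fst).map pvIsFemale).foldl
        (fun (acc : List Int) g => acc ++ [(PySem.List.pyGet? acc (-1)).getD 0 + (if g then 1 else 0)])
        [(0 : Int)]
     ((PySem.List.enumerate ((cc.map Prod.fst).zip ((cc.map Prod.fst).map pvIsFemale)) 0).foldl
      (fun (d : PySem.Dict String String) ig =>
        d.insert ig.2.1
          (if ig.2.2 then
            (PySem.List.pyGet? pvFemaleVoices (PySem.Int.mod ((PySem.List.pyGet? fsf ig.1).getD 0) 5)).getD ""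
          else
            (PySem.List.pyGet? pvMaleVoices (PySem.Int.mod (ig.1 - (PySem.List.pyGet? fsf ig.1).getD 0) 5)).getD ""))
      PySem.Dict.empty).items)
  have hmm : (cc.map Prod.fst).map pvIsFemale = cc.map (fun p => pvIsFemale p.1) := by
    rw [List.map_map]; rfl
  have hzip : (cc.map Prod.fst).zip (cc.map (fun p => pvIsFemale p.1))
      = cc.map (fun p => (p.1, pvIsFemale p.1)) := by
    rw [List.zip_map']
  have hinit : [(0 : Int)] = pvPrefix [] := rfl
  simp only [hinit, pvFsf_eq_prefix, List.nil_append, hmm]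
  simp only [hzip]
  have hB := pvB_eq_gold cc (cc.map (fun p => pvIsFemale p.1)) 0 PySem.Dict.empty (by rfl)
  simp only [Nat.cast_zero, List.take_zero, List.count_nil] at hB
  rw [hB]
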